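-- pv_equiv track=rewrite | github.com/ShiftingNova/prepsss | prep32.py | get_common_movies
-- ===== SOURCE A (Python) =====
-- def get_common_movies(list):
--     common = []
--     for i in range(len(list)-1):
--         current = list[i]
--         for e in current:
--             if e in list[i+1]:
--                 if e not in common:
--                     common.append(e)
--     thing = set(common)
--     return thing
-- ===== SOURCE B (Python) =====
-- def get_common_movies(list):
--     occ = sorted({(e, i) for i, sub in enumerate(list) for e in sub})
--     return {e for (e, i), (e2, i2) in zip(occ, occ[1:]) if e == e2 and i2 == i + 1}
-- ===== Notes on version B (the rewrite author's own statement) =====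
-- stated objective: faster
-- what changed: Replaces A's nested linear membership scans over consecutive sublists by sort-then-scan: build the distinct (element, sublist-index) occurrence pairs, sort them once, and collect an element whenever two adjacent sorted pairs carry the same element with consecutive indices.
import Mathlib
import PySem

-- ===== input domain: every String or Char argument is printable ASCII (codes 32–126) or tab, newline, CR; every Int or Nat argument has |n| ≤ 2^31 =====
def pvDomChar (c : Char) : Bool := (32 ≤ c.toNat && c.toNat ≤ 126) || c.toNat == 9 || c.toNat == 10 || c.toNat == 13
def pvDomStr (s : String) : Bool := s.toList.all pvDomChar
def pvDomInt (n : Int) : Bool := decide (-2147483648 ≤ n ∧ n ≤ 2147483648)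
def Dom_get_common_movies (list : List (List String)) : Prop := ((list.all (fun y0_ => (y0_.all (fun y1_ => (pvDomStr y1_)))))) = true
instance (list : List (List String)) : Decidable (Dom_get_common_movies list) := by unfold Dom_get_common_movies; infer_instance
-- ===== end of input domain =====

-- B replaces A's nested linear membership scans by sort-then-scan over the distinct
-- (element, sublist-index) occurrence pairs: after sorting, an element is common to a
-- consecutive pair of sublists iff two adjacent occurrence pairs carry the same element
-- and consecutive indices. Both Pythons return a set (whose iteration order Python does
-- not specify and PySem does not model); each port therefore represents the returned
-- set as the sorted list of its distinct elements, and outputs are compared as sets.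

-- ===== PORT A =====
def get_common_movies (list : List (List String)) : List String :=
  let common : List String :=
    (PySem.List.pyRange 0 (PySem.List.len list - 1) 1).foldl
      (fun common i =>
        let current := PySem.List.pyGetD list i []
        current.foldl
          (fun common e =>
            if (PySem.List.pyGetD list (i + 1) []).contains e then
              if common.contains e then common else common ++ [e]
            else common)
          common)
      []
  -- 'return set(common)': the set's unordered value, represented in sorted order
  PySem.List.sorted (PySem.Set.ofList common) (fun x => x) false

-- ===== PORT B =====
def get_common_movies_alt (list : List (List String)) : List String :=
  let occ : List (String × Int) :=
    PySem.List.sorted2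
      (PySem.Set.ofList ((PySem.List.enumerate list 0).flatMap
        (fun p => p.2.map (fun e => (e, p.1)))))
      (fun q => q.1) (fun q => q.2)
  -- the set comprehension over the adjacent-pair scan (its generation order is already sorted)
  PySem.Set.ofList
    (((occ.zip (occ.drop 1)).filter
        (fun z => z.1.1 == z.2.1 && z.2.2 == z.1.2 + 1)).map (fun z => z.1.1))

-- ===== PRECONDITION & SPEC =====
def Spec_get_common_movies (list : List (List String)) (out : List String) : Prop := out = get_common_movies_alt list
instance (list : List (List String)) (out : List String) : Decidable (Spec_get_common_movies list out) := by unfold Spec_get_common_movies; infer_instance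

-- ===== CLAIM (what is proved, stated in full; the proofs are below) =====
def Claim_equal_get_common_movies : Prop := ∀ (list : List (List String)), Dom_get_common_movies list → Spec_get_common_movies list (get_common_movies list)

-- ===== LEMMAS AND PROOFS =====

-- the strict lexicographic order that sorted2 realises on (String × Int) occurrence pairs
def pvLex (a b : String × Int) : Prop := a.1 < b.1 ∨ (a.1 = b.1 ∧ a.2 < b.2)

theorem pvLex_trans {a b c : String × Int} (h1 : pvLex a b) (h2 : pvLex b c) : pvLex a c := by
  rcases h1 with h1 | ⟨h1, h1'⟩ <;> rcases h2 with h2 | ⟨h2, h2'⟩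
  · exact Or.inl (lt_trans h1 h2)
  · exact Or.inl (h2 ▸ h1)
  · exact Or.inl (h1 ▸ h2)
  · exact Or.inr ⟨h1.trans h2, lt_trans h1' h2'⟩

theorem pvLex_irrefl (a : String × Int) : ¬ pvLex a a := by
  rintro (h | ⟨_, h⟩) <;> exact lt_irrefl _ h

theorem pvLex_asymm {a b : String × Int} (h : pvLex a b) : ¬ pvLex b a := by
  intro h'
  exact pvLex_irrefl a (pvLex_trans h h')

theorem pvLex_total {a b : String × Int} (h : a ≠ b) : pvLex a b ∨ pvLex b a := by
  rcases lt_trichotomy a.1 b.1 with h1 | h1 | h1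
  · exact Or.inl (Or.inl h1)
  · rcases lt_trichotomy a.2 b.2 with h2 | h2 | h2
    · exact Or.inl (Or.inr ⟨h1, h2⟩)
    · exact absurd (Prod.ext h1 h2) h
    · exact Or.inr (Or.inr ⟨h1.symm, h2⟩)
  · exact Or.inr (Or.inl h1)

-- sorted2's comparison function, as a Prop
theorem pv_before_iff (a b : String × Int) :
    (decide (a.1 < b.1) || (!decide (b.1 < a.1) && decide (a.2 < b.2))) = true ↔ pvLex a b := by
  unfold pvLex
  rcases lt_trichotomy a.1 b.1 with h | h | h
  · simp [h, asymm h]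
  · simp [h]
  · have h1 : ¬ a.1 < b.1 := asymm h
    have h2 : ¬ a.1 = b.1 := ne_of_gt h
    simp [h, h1, h2]

-- insertion sort (sorted2 = foldl insertBy) yields a weakly ascending list
theorem pv_insertBy_pairwise (x : String × Int) :
    ∀ (ys : List (String × Int)),
      ys.Pairwise (fun a b => ¬ pvLex b a) →
      (PySem.List.insertBy (fun a b => decide (a.1 < b.1) || (!decide (b.1 < a.1) && decide (a.2 < b.2))) x ys).Pairwise
        (fun a b => ¬ pvLex b a) := by
  intro ys
  induction ys with
  | nil => intro _; simp [PySem.List.insertBy]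
  | cons y t ih =>
    intro h
    rw [List.pairwise_cons] at h
    obtain ⟨hy, ht⟩ := h
    show (if (decide (x.1 < y.1) || (!decide (y.1 < x.1) && decide (x.2 < y.2))) = true then
            x :: y :: t
          else y :: PySem.List.insertBy _ x t).Pairwise (fun a b => ¬ pvLex b a)
    split_ifs with hc
    · have hxy : pvLex x y := (pv_before_iff x y).1 hc
      refine List.pairwise_cons.2 ⟨?_, List.pairwise_cons.2 ⟨hy, ht⟩⟩
      intro z hz
      rcases List.mem_cons.1 hz with rfl | hz
      · exact pvLex_asymm hxy
      · intro hzx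
        exact hy z hz (pvLex_trans hzx hxy)
    · have hnxy : ¬ pvLex x y := fun hl => hc ((pv_before_iff x y).2 hl)
      refine List.pairwise_cons.2 ⟨?_, ih ht⟩
      intro z hz
      rcases (PySem.List.mem_insertBy _ x z t).1 hz with rfl | hz
      · exact hnxy
      · exact hy z hz

theorem pv_foldl_insertBy_pairwise :
    ∀ (l : List (String × Int)) (acc : List (String × Int)),
      acc.Pairwise (fun a b => ¬ pvLex b a) →
      (l.foldl (fun acc x => PySem.List.insertBy
        (fun a b => decide (a.1 < b.1) || (!decide (b.1 < a.1) && decide (a.2 < b.2))) x acc) acc).Pairwise (fun a b => ¬ pvLex b a) := by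
  intro l
  induction l with
  | nil => intro acc h; exact h
  | cons x t ih =>
    intro acc h
    exact ih _ (pv_insertBy_pairwise x acc h)

theorem pv_sorted2_pairwise (xs : List (String × Int)) :
    (PySem.List.sorted2 xs (fun q => q.1) (fun q => q.2)).Pairwise (fun a b => ¬ pvLex b a) := by
  show (xs.foldl (fun acc x => PySem.List.insertBy
    (fun a b => decide (a.1 < b.1) || (!decide (b.1 < a.1) && decide (a.2 < b.2))) x acc) []).Pairwise (fun a b => ¬ pvLex b a)
  exact pv_foldl_insertBy_pairwise xs [] List.Pairwise.nil

-- in a strictly ascending list, two members with nothing strictly between them are adjacent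
theorem pv_adjacent (a b : String × Int) :
    ∀ (l : List (String × Int)), l.Pairwise pvLex → a ∈ l → b ∈ l → pvLex a b →
      (∀ c ∈ l, pvLex a c → pvLex c b → False) →
      (a, b) ∈ l.zip (l.drop 1) := by
  intro l
  induction l with
  | nil => intro _ ha; simp at ha
  | cons x t ih =>
    intro hp ha hb hab hno
    rw [List.pairwise_cons] at hp
    obtain ⟨hx, hpt⟩ := hp
    rcases List.mem_cons.1 ha with rfl | ha2
    · have hb' : b ∈ t := by
        rcases List.mem_cons.1 hb with rfl | hb'
        · exact absurd hab (pvLex_irrefl b)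
        · exact hb'
      cases t with
      | nil => simp at hb'
      | cons y s =>
        have hzip : (a :: y :: s).zip ((a :: y :: s).drop 1)
            = (a, y) :: ((y :: s).zip ((y :: s).drop 1)) := by simp
        rw [hzip]
        by_cases hyb : y = b
        · subst hyb
          exact List.mem_cons_self
        · have hyt : pvLex y b := by
            rcases List.mem_cons.1 hb' with rfl | hbs
            · exact absurd rfl hyb
            · exact (List.pairwise_cons.1 hpt).1 b hbs
          exact (hno y (List.mem_cons_of_mem _ List.mem_cons_self)
            (hx y List.mem_cons_self) hyt).elim
    · have hb' : b ∈ t := by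
        rcases List.mem_cons.1 hb with rfl | hb'
        · exact absurd hab (pvLex_asymm (hx a ha2))
        · exact hb'
      have hmem := ih hpt ha2 hb' hab
        (fun c hc h1 h2 => hno c (List.mem_cons_of_mem _ hc) h1 h2)
      cases t with
      | nil => simp at ha2
      | cons y s =>
        have hzip : (x :: y :: s).zip ((x :: y :: s).drop 1)
            = (x, y) :: ((y :: s).zip ((y :: s).drop 1)) := by simp
        rw [hzip]
        exact List.mem_cons_of_mem _ hmem

-- membership in the occurrence-pair pool
theorem pv_mem_raw (list : List (List String)) (x : String) (i : Int) :
    ((x, i) ∈ (PySem.List.enumerate list 0).flatMap (fun p => p.2.map (fun e => (e, p.1)))) ↔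
      ∃ (k : Nat) (h : k < list.length), i = (k : Int) ∧ x ∈ list[k] := by
  rw [List.mem_flatMap]
  constructor
  · rintro ⟨p, hp, hm⟩
    obtain ⟨k, hk, rfl⟩ := (PySem.List.mem_enumerate_iff list 0 p).1 hp
    obtain ⟨e, he, heq⟩ := List.mem_map.1 hm
    refine ⟨k, hk, ?_, ?_⟩
    · have := congrArg Prod.snd heq
      simpa using this.symm
    · have := congrArg Prod.fst heq
      simp at this
      exact this ▸ he
  · rintro ⟨k, hk, rfl, hx⟩
    refine ⟨((k : Int), list[k]), ?_, ?_⟩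
    · exact (PySem.List.mem_enumerate_iff list 0 _).2 ⟨k, hk, by simp⟩
    · exact List.mem_map.2 ⟨x, hx, rfl⟩

-- membership in zip-with-successor
theorem pv_mem_zip_drop {α : Type} (p : α × α) :
    ∀ (l : List α), p ∈ l.zip (l.drop 1) ↔ ∃ (k : Nat) (h : k + 1 < l.length), p = (l[k], l[k + 1]) := by
  intro l
  induction l with
  | nil => simp
  | cons x t ih =>
    cases t with
    | nil => simp
    | cons y s =>
      have hzip : (x :: y :: s).zip ((x :: y :: s).drop 1)
          = (x, y) :: ((y :: s).zip ((y :: s).drop 1)) := by simp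
      rw [hzip]
      constructor
      · intro hm
        rcases List.mem_cons.1 hm with rfl | hm
        · exact ⟨0, by simp, rfl⟩
        · obtain ⟨k, hk, rfl⟩ := (ih).1 hm
          exact ⟨k + 1, by simpa using hk, by simp⟩
      · rintro ⟨k, hk, rfl⟩
        cases k with
        | zero => exact List.mem_cons_self
        | succ k =>
          refine List.mem_cons_of_mem _ ((ih).2 ⟨k, by simpa using hk, by simp⟩)

theorem pv_zip_map_fst_sublist {α β : Type} : ∀ (l : List α) (t : List β),
    ((l.zip t).map Prod.fst).Sublist l := by
  intro l
  induction l with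
  | nil => intro t; simp
  | cons x xs ih =>
    intro t
    cases t with
    | nil => simp
    | cons y ys => simpa using List.Sublist.cons₂ x (ih ys)

theorem pv_ofList_sublist {α : Type} [BEq α] [LawfulBEq α] :
    ∀ (xs : List α), (PySem.Set.ofList xs).Sublist xs := by
  intro xs
  induction xs with
  | nil => simp [PySem.Set.ofList]
  | cons x t ih =>
    rw [PySem.Set.ofList_cons]
    refine List.Sublist.cons₂ x ?_
    exact List.Sublist.trans (by simpa [PySem.Set.discard] using List.filter_sublist) ih

-- A's index loop over range(len-1) reading list[i], list[i+1] is a fold over consecutive pairs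
theorem pv_bridge {β : Type} (f : β → List String → List String → β) :
    ∀ (l : List (List String)) (init : β),
      (PySem.List.pyRange 0 ((l.length : Int) - 1) 1).foldl
        (fun acc i => f acc (PySem.List.pyGetD l i []) (PySem.List.pyGetD l (i + 1) [])) init
      = (l.zip (l.drop 1)).foldl (fun acc p => f acc p.1 p.2) init := by
  intro l
  induction l with
  | nil => intro init; simp [PySem.List.pyRange_one_eq_nil]
  | cons x xs ih =>
    intro init
    cases xs with
    | nil => simp [PySem.List.pyRange_one_eq_nil]
    | cons y rest =>
      have h1 : ((x :: y :: rest).length : Int) - 1 = ((y :: rest).length : Int) := by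
        simp
      rw [h1, PySem.List.pyRange_one_cons (by exact_mod_cast Nat.succ_pos rest.length)]
      simp only [List.foldl_cons]
      have h3 : PySem.List.pyRange (0 + 1) ((y :: rest).length : Int) 1
          = (PySem.List.pyRange 0 (((y :: rest).length : Int) - 1) 1).map (· + 1) := by
        rw [PySem.List.pyRange_one, PySem.List.pyRange_one, List.map_map]
        simp [Function.comp, add_comm]
      rw [h3, List.foldl_map]
      have h4 : ∀ (j : Int), 0 ≤ j →
          PySem.List.pyGetD (x :: y :: rest) (j + 1) [] = PySem.List.pyGetD (y :: rest) j [] := by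
        intro j hj
        obtain ⟨n, rfl⟩ := Int.eq_ofNat_of_zero_le hj
        have hc : (n : Int) + 1 = ((n + 1 : Nat) : Int) := by push_cast; ring
        rw [hc, PySem.List.pyGetD_natCast, PySem.List.pyGetD_natCast]
        rfl
      rw [PySem.List.foldl_congr_mem _ _
            (fun acc j => f acc (PySem.List.pyGetD (y :: rest) j []) (PySem.List.pyGetD (y :: rest) (j + 1) [])) _
            (by
              intro acc j hj
              have hj0 : 0 ≤ j := (PySem.List.mem_pyRange_one.1 hj).1
              rw [h4 j hj0, h4 (j + 1) (by omega)])]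
      rw [ih]
      have h0 : PySem.List.pyGetD (x :: y :: rest) 0 [] = x := by
        rw [show ((0:Int)) = ((0:Nat):Int) from rfl, PySem.List.pyGetD_natCast]; rfl
      have h01 : PySem.List.pyGetD (x :: y :: rest) (0 + 1) [] = y := by
        rw [show ((0:Int)+1) = ((1:Nat):Int) by norm_num, PySem.List.pyGetD_natCast]; rfl
      rw [h0, h01]
      rfl

-- A's inner loop "append if in next and not yet in common" is a Set.update with the filtered sublist
theorem pv_ifadd (p : String → Bool) :
    ∀ (cur : List String) (acc : PySem.Set String),
      cur.foldl (fun c e => if p e then PySem.Set.add c e else c) acc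
      = PySem.Set.update acc (cur.filter p) := by
  intro cur
  induction cur with
  | nil => intro acc; rfl
  | cons x xs ih =>
    intro acc
    by_cases h : p x = true
    · simp [h, ih, PySem.Set.update]
    · simp [h, ih, PySem.Set.update]

theorem pv_mem_zipfold (x : String) :
    ∀ (zs : List (List String × List String)) (acc : PySem.Set String),
      (x ∈ zs.foldl (fun acc p => PySem.Set.update acc (p.1.filter (fun e => p.2.contains e))) acc) ↔
        x ∈ acc ∨ ∃ p ∈ zs, x ∈ p.1 ∧ x ∈ p.2 := by
  intro zs
  induction zs with
  | nil => simp
  | cons z t ih =>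
    intro acc
    simp only [List.foldl_cons]
    rw [ih, PySem.Set.mem_update]
    simp only [List.mem_filter, List.mem_cons]
    constructor
    · rintro ((h | ⟨h1, h2⟩) | ⟨p, hp, h1, h2⟩)
      · exact Or.inl h
      · exact Or.inr ⟨z, Or.inl rfl, h1, by simpa using h2⟩
      · exact Or.inr ⟨p, Or.inr hp, h1, h2⟩
    · rintro (h | ⟨p, (rfl | hp), h1, h2⟩)
      · exact Or.inl (Or.inl h)
      · exact Or.inl (Or.inr ⟨h1, by simpa using h2⟩)
      · exact Or.inr ⟨p, hp, h1, h2⟩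

theorem pv_foldl_nodup :
    ∀ (zs : List (List String × List String)) (s : PySem.Set String), s.Nodup →
      (zs.foldl (fun acc p => PySem.Set.update acc (p.1.filter (fun e => p.2.contains e))) s).Nodup := by
  intro zs
  induction zs with
  | nil => intro s hs; exact hs
  | cons z zt ih =>
    intro s hs
    exact ih _ (PySem.Set.nodup_update _ _ hs)

theorem pv_main (list : List (List String)) :
    get_common_movies list = get_common_movies_alt list := by
  unfold get_common_movies get_common_movies_alt
  simp only [PySem.List.len_eq]
  rw [pv_bridge (fun acc cur nxt =>
        cur.foldl (fun c e =>
          if nxt.contains e = true then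
            if c.contains e = true then c else c ++ [e]
          else c) acc) list []]
  have hcommonEq : (list.zip (list.drop 1)).foldl
      (fun acc (p : List String × List String) =>
        p.1.foldl (fun c e =>
          if p.2.contains e = true then
            if c.contains e = true then c else c ++ [e]
          else c) acc) ([] : List String)
      = (list.zip (list.drop 1)).foldl
          (fun acc p => PySem.Set.update acc (p.1.filter (fun e => p.2.contains e))) [] := by
    apply PySem.List.foldl_congr_mem
    intro acc p _
    exact pv_ifadd (fun e => p.2.contains e) p.1 acc
  rw [hcommonEq]
  -- names for the two sides
  set common : List String := (list.zip (list.drop 1)).foldl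
      (fun acc p => PySem.Set.update acc (p.1.filter (fun e => p.2.contains e))) [] with hcommon
  set raw : List (String × Int) := (PySem.List.enumerate list 0).flatMap
      (fun p => p.2.map (fun e => (e, p.1))) with hrawdef
  set occ : List (String × Int) := PySem.List.sorted2 (PySem.Set.ofList raw)
      (fun q => q.1) (fun q => q.2) with hoccdef
  set L : List String := ((occ.zip (occ.drop 1)).filter
      (fun z => z.1.1 == z.2.1 && z.2.2 == z.1.2 + 1)).map (fun z => z.1.1) with hLdef
  -- occ: a strictly lex-sorted duplicate-free list of exactly the occurrence pairs
  have hoccPerm : occ.Perm (PySem.Set.ofList raw) :=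
    PySem.List.sorted2_perm (PySem.Set.ofList raw) (fun q => q.1) (fun q => q.2) false
  have hmemocc : ∀ (q : String × Int), q ∈ occ ↔ q ∈ raw := by
    intro q
    rw [hoccPerm.mem_iff, PySem.Set.mem_ofList]
  have hoccNodup : occ.Nodup := hoccPerm.nodup_iff.2 (PySem.Set.nodup_ofList raw)
  have hoccLex : occ.Pairwise pvLex := by
    have hne : occ.Pairwise (fun a b => a ≠ b) := hoccNodup
    exact ((pv_sorted2_pairwise (PySem.Set.ofList raw)).and hne).imp
      (fun h => (pvLex_total h.2).resolve_right h.1)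
  -- membership in B's scan result
  have hBmem : ∀ x : String, x ∈ L ↔
      ∃ (k : Nat) (h : k + 1 < list.length), x ∈ list[k] ∧ x ∈ list[k + 1] := by
    intro x
    rw [hLdef]
    constructor
    · intro hx
      obtain ⟨z, hz, rfl⟩ := List.mem_map.1 hx
      obtain ⟨hzz, hzp⟩ := List.mem_filter.1 hz
      obtain ⟨k, hk, rfl⟩ := (pv_mem_zip_drop z occ).1 hzz
      simp only [Bool.and_eq_true, beq_iff_eq] at hzp
      obtain ⟨heq, hsucc⟩ := hzp
      have hklt : k < occ.length := by omega
      have h1 := (hmemocc occ[k]).1 (List.getElem_mem hklt)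
      have h2 := (hmemocc occ[k + 1]).1 (List.getElem_mem hk)
      obtain ⟨k1, hk1, hi1, hx1⟩ := (pv_mem_raw list occ[k].1 occ[k].2).1 h1
      obtain ⟨k2, hk2, hi2, hx2⟩ := (pv_mem_raw list occ[k + 1].1 occ[k + 1].2).1 h2
      have hk21 : k2 = k1 + 1 := by
        rw [hi1] at hsucc
        rw [hsucc] at hi2
        omega
      subst hk21
      refine ⟨k1, by omega, hx1, ?_⟩
      rw [heq]
      exact hx2
    · rintro ⟨k, hk, hx1, hx2⟩
      have hm1 : (x, (k : Int)) ∈ occ :=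
        (hmemocc _).2 ((pv_mem_raw list x k).2 ⟨k, by omega, rfl, hx1⟩)
      have hm2 : (x, (k : Int) + 1) ∈ occ :=
        (hmemocc _).2 ((pv_mem_raw list x ((k : Int) + 1)).2
          ⟨k + 1, hk, by push_cast; ring, hx2⟩)
      have hlex : pvLex (x, (k : Int)) (x, (k : Int) + 1) := Or.inr ⟨rfl, by omega⟩
      have hno : ∀ c ∈ occ, pvLex (x, (k : Int)) c → pvLex c (x, (k : Int) + 1) → False := by
        rintro c _ hac hcb
        have hac' : x < c.1 ∨ (x = c.1 ∧ (k : Int) < c.2) := hac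
        have hcb' : c.1 < x ∨ (c.1 = x ∧ c.2 < (k : Int) + 1) := hcb
        rcases hac' with h1 | ⟨h1, h1'⟩ <;> rcases hcb' with h2 | ⟨h2, h2'⟩
        · exact lt_asymm h1 h2
        · exact lt_irrefl x (h2 ▸ h1)
        · exact lt_irrefl c.1 (h1 ▸ h2)
        · omega
      have hadj := pv_adjacent (x, (k : Int)) (x, (k : Int) + 1) occ hoccLex hm1 hm2 hlex hno
      refine List.mem_map.2 ⟨((x, (k : Int)), (x, (k : Int) + 1)), List.mem_filter.2 ⟨hadj, by simp⟩, rfl⟩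
  -- membership in A's accumulated list
  have hAmem : ∀ x : String, x ∈ common ↔
      ∃ (k : Nat) (h : k + 1 < list.length), x ∈ list[k] ∧ x ∈ list[k + 1] := by
    intro x
    rw [hcommon, pv_mem_zipfold]
    simp only [List.not_mem_nil, false_or]
    constructor
    · rintro ⟨p, hp, h1, h2⟩
      obtain ⟨k, hk, rfl⟩ := (pv_mem_zip_drop p list).1 hp
      exact ⟨k, hk, h1, h2⟩
    · rintro ⟨k, hk, h1, h2⟩
      exact ⟨(list[k], list[k + 1]), (pv_mem_zip_drop _ list).2 ⟨k, hk, rfl⟩, h1, h2⟩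
  have hcommonNodup : common.Nodup := pv_foldl_nodup _ [] List.nodup_nil
  -- B's result list is strictly ascending
  have hMsub : (((occ.zip (occ.drop 1)).filter
      (fun z => z.1.1 == z.2.1 && z.2.2 == z.1.2 + 1)).map Prod.fst).Sublist occ :=
    (List.Sublist.map Prod.fst List.filter_sublist).trans (pv_zip_map_fst_sublist occ (occ.drop 1))
  have hLle : L.Pairwise (fun a b : String => a ≤ b) := by
    have hfst : occ.Pairwise (fun a b => a.1 ≤ b.1) :=
      hoccLex.imp (fun h => by
        rcases h with h | ⟨h, _⟩
        · exact le_of_lt h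
        · exact le_of_eq h)
    have hM := List.Pairwise.sublist hMsub hfst
    have hLmm : L = (((occ.zip (occ.drop 1)).filter
        (fun z => z.1.1 == z.2.1 && z.2.2 == z.1.2 + 1)).map Prod.fst).map Prod.fst := by
      rw [hLdef, List.map_map]
      rfl
    rw [hLmm, List.pairwise_map]
    exact (List.pairwise_map.1 (List.pairwise_map.2 hM))
  have hBnodup : (PySem.Set.ofList L).Nodup := PySem.Set.nodup_ofList L
  have hBle : (PySem.Set.ofList L).Pairwise (fun a b : String => a ≤ b) :=
    List.Pairwise.sublist (pv_ofList_sublist L) hLle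
  have hBlt : (PySem.Set.ofList L).Pairwise (fun a b : String => a < b) := by
    have hne : (PySem.Set.ofList L).Pairwise (fun a b => a ≠ b) := hBnodup
    exact (hBle.and hne).imp (fun h => lt_of_le_of_ne h.1 h.2)
  -- same members, hence the sorted set representation of A equals B's list
  have hperm : (PySem.Set.ofList L).Perm (PySem.Set.ofList common) := by
    rw [List.perm_ext_iff_of_nodup hBnodup (PySem.Set.nodup_ofList common)]
    intro a
    rw [PySem.Set.mem_ofList, PySem.Set.mem_ofList, hBmem, hAmem]
  exact PySem.List.sorted_eq_of_perm_of_pairwise_lt _ _ _ hperm hBlt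

theorem get_common_movies_spec : Claim_equal_get_common_movies := by
  intro list _
  show get_common_movies list = get_common_movies_alt list
  exact pv_main list
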